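-- pv_equiv track=rewrite | github.com/LudovicoBorro/Lab07 | model/model.py | _step_is_valid
-- ===== SOURCE A (Python) =====
-- def _step_is_valid(soluzione_parziale):
--     # In una città bisogna stare almeno 3 giorni consecutivi
--     # Prendo l'ultimo indice della soluzione_parziale,
--     # ciclo su tutti gli ultimi elementi. Conto quanti elementi sono uguali,
--     # se sono meno di 3 return False, altrimenti resetto il contatore e
--     # conto il prossimo gruppo.
--     # altrimenti return True
--     count_uguali = 0
--     elemento_da_paragonare = soluzione_parziale[0][0]
--     for i, (element, data) in enumerate(soluzione_parziale[0 : len(soluzione_parziale)]):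
--         if element == elemento_da_paragonare:
--             count_uguali += 1
--         else:
--             if count_uguali < 3:
--                 return False
--             else:
--                 count_uguali = 1
--                 elemento_da_paragonare = element
--     if count_uguali < 3:
--         return False
--     return True
-- ===== SOURCE B (Python) =====
-- def _step_is_valid(soluzione_parziale):
--     # Two-pointer scan over group boundaries: find the end of each run of
--     # equal cities, reject runs shorter than 3.
--     i, n = 0, len(soluzione_parziale)
--     while i < n:
--         j = i + 1
--         while j < n and soluzione_parziale[j][0] == soluzione_parziale[i][0]:
--             j += 1
--         if j - i < 3:
--             return False
--         i = j
--     return True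
-- ===== Notes on version B (the rewrite author's own statement) =====
-- stated objective: alternative
-- what changed: Replaces A's single-pass counter/comparator state machine (count_uguali, elemento_da_paragonare, reset logic) with a two-pointer scan that locates each run boundary and checks the run length directly.
import Mathlib
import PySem

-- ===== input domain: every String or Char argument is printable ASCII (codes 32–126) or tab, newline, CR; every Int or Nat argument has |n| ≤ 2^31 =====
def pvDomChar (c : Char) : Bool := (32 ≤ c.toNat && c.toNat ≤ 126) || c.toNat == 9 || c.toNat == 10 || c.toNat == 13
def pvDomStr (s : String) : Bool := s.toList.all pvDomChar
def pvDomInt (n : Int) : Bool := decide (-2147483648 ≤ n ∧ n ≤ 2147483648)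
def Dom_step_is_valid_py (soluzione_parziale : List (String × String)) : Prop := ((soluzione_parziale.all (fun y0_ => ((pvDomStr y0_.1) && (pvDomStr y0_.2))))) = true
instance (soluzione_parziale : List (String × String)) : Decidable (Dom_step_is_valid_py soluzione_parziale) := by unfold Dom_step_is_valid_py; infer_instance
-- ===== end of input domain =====

-- B replaces A's counter/comparator state machine with a two-pointer scan over
-- run boundaries (alternative decomposition, same O(n) cost).


-- ===== PORT A =====
-- the for-loop: state (count_uguali, elemento_da_paragonare); none = early `return False`
def stepALoop : List (String × String) → Int → String → Option Int
  | [], c, _ => some c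
  | (el, _) :: rest, c, k =>
    if el == k then stepALoop rest (c + 1) k
    else if c < 3 then none
    else stepALoop rest 1 el

def step_is_valid_py (soluzione_parziale : List (String × String)) : Bool :=
  match soluzione_parziale with
  | [] => false   -- A raises IndexError (soluzione_parziale[0][0]); excluded by Pre_
  | (k, _) :: _ =>
    -- the slice soluzione_parziale[0:len(soluzione_parziale)] is the whole list
    match stepALoop soluzione_parziale 0 k with
    | none => false
    | some c => if c < 3 then false else true

-- ===== PORT B =====
-- outer while: one step per run; inner while (j scanning matching elements) = takeWhile/dropWhile of the tail
def step_is_valid_py_alt : List (String × String) → Bool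
  | [] => true
  | (c, _) :: rest =>
    let run := rest.takeWhile (fun p => p.1 == c)
    if ((run.length : Int) + 1 < 3) then false
    else step_is_valid_py_alt (rest.dropWhile (fun p => p.1 == c))
  termination_by l => l.length
  decreasing_by
    simp only [List.length_cons]
    exact Nat.lt_succ_of_le (List.length_dropWhile_le _ _)

-- ===== PRECONDITION & SPEC =====
-- Pre_ excludes only the empty list, on which A raises IndexError.
def Pre_step_is_valid_py (soluzione_parziale : List (String × String)) : Prop :=
  soluzione_parziale ≠ []
instance (soluzione_parziale : List (String × String)) : Decidable (Pre_step_is_valid_py soluzione_parziale) := by unfold Pre_step_is_valid_py; infer_instance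
def pvWitness_step_is_valid_py : (List (String × String)) := [("a", "1"), ("a", "2"), ("a", "3")]

def Spec_step_is_valid_py (soluzione_parziale : List (String × String)) (out : Bool) : Prop := out = step_is_valid_py_alt soluzione_parziale
instance (soluzione_parziale : List (String × String)) (out : Bool) : Decidable (Spec_step_is_valid_py soluzione_parziale out) := by unfold Spec_step_is_valid_py; infer_instance

-- ===== CLAIM (what is proved, stated in full; the proofs are below) =====
def Claim_equal_step_is_valid_py : Prop := ∀ (soluzione_parziale : List (String × String)), Dom_step_is_valid_py soluzione_parziale → Pre_step_is_valid_py soluzione_parziale → Spec_step_is_valid_py soluzione_parziale (step_is_valid_py soluzione_parziale)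

-- ===== LEMMAS AND PROOFS =====
theorem alt_cons (c d : String) (rest : List (String × String)) :
    step_is_valid_py_alt ((c, d) :: rest) =
      if (((rest.takeWhile (fun p => p.1 == c)).length : Int) + 1 < 3) then false
      else step_is_valid_py_alt (rest.dropWhile (fun p => p.1 == c)) := by
  rw [step_is_valid_py_alt.eq_def]

-- result of A's loop, mapped through the trailing "if count_uguali < 3"
def stepARes (l : List (String × String)) (c : Int) (k : String) : Bool :=
  match stepALoop l c k with
  | none => false
  | some c => if c < 3 then false else true

theorem stepARes_eq (l : List (String × String)) :
    ∀ (k : String) (c : Int),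
      stepARes l c k =
        ((decide (3 ≤ c + ((l.takeWhile (fun p => p.1 == k)).length : Int))) &&
          step_is_valid_py_alt (l.dropWhile (fun p => p.1 == k))) := by
  induction l with
  | nil =>
    intro k c
    rw [step_is_valid_py_alt.eq_def]
    simp only [stepARes, stepALoop, List.takeWhile, List.dropWhile,
      List.length_nil, Nat.cast_zero, add_zero, Bool.and_true]
    rcases lt_or_ge c 3 with hc | hc
    · simp [hc]
    · simp [hc]
  | cons hd tl ih =>
    intro k c
    obtain ⟨el, d⟩ := hd
    by_cases h : el = k
    · subst h
      have hstep : stepARes ((el, d) :: tl) c el = stepARes tl (c + 1) el := by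
        simp [stepARes, stepALoop]
      rw [hstep, ih el (c + 1)]
      simp only [List.takeWhile, List.dropWhile, beq_self_eq_true, List.length_cons,
        Nat.cast_add, Nat.cast_one]
      congr 1
      simp only [decide_eq_decide]
      omega
    · have hne : (el == k) = false := by simp [h]
      simp only [List.takeWhile, List.dropWhile, hne, List.length_nil,
        Nat.cast_zero, add_zero]
      rcases lt_or_ge c 3 with hc | hc
      · have hA : stepARes ((el, d) :: tl) c k = false := by
          simp [stepARes, stepALoop, hne, hc]
        have hd3 : decide (3 ≤ c) = false := by simp; omega
        rw [hA, hd3, Bool.false_and]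
      · have hA : stepARes ((el, d) :: tl) c k = stepARes tl 1 el := by
          have : ¬ c < 3 := by omega
          simp [stepARes, stepALoop, hne, this]
        have hd3 : decide (3 ≤ c) = true := by simp; omega
        rw [hA, ih el 1, hd3, Bool.true_and, alt_cons]
        rcases lt_or_ge ((tl.takeWhile (fun p => p.1 == el)).length : Int) 2 with hl | hl
        · have h1 : decide (3 ≤ (1 : Int) + ((tl.takeWhile (fun p => p.1 == el)).length : Int)) = false := by
            simp; omega
          have h2 : (((tl.takeWhile (fun p => p.1 == el)).length : Int) + 1 < 3) := by omega
          rw [h1, Bool.false_and, if_pos h2]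
        · have h1 : decide (3 ≤ (1 : Int) + ((tl.takeWhile (fun p => p.1 == el)).length : Int)) = true := by
            simp; omega
          have h2 : ¬ (((tl.takeWhile (fun p => p.1 == el)).length : Int) + 1 < 3) := by omega
          rw [h1, Bool.true_and, if_neg h2]

-- ===== VERDICT (by name: the statement is the Claim_ definition above) =====
theorem step_is_valid_py_spec : Claim_equal_step_is_valid_py := by
  intro sp _ hpre
  unfold Spec_step_is_valid_py
  match sp with
  | [] => exact absurd rfl hpre
  | (k, d) :: rest =>
    have hA : step_is_valid_py ((k, d) :: rest) = stepARes rest 1 k := by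
      simp [step_is_valid_py, stepARes, stepALoop]
    rw [hA, stepARes_eq rest k 1, alt_cons]
    rcases lt_or_ge ((rest.takeWhile (fun p => p.1 == k)).length : Int) 2 with hl | hl
    · have h1 : decide (3 ≤ (1 : Int) + ((rest.takeWhile (fun p => p.1 == k)).length : Int)) = false := by
        simp; omega
      have h2 : (((rest.takeWhile (fun p => p.1 == k)).length : Int) + 1 < 3) := by omega
      rw [h1, Bool.false_and, if_pos h2]
    · have h1 : decide (3 ≤ (1 : Int) + ((rest.takeWhile (fun p => p.1 == k)).length : Int)) = true := by
        simp; omega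
      have h2 : ¬ (((rest.takeWhile (fun p => p.1 == k)).length : Int) + 1 < 3) := by omega
      rw [h1, Bool.true_and, if_neg h2]
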